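-- pv_equiv track=rewrite | github.com/ekansa/open-context-py | opencontext_py/apps/searcher/new_solrsearcher/utilities.py | get_aggregation_depth_to_group_paths
-- ===== SOURCE A (Python) =====
-- def get_aggregation_depth_to_group_paths(
--     max_groups,
--     paths,
--     max_depth=None
-- ):
--     """Gets the number of characters needed to group a list
--     of hiearchic path strings.
--
--     :param int max_groups: The maximum number of groups wanted.
--     :param list paths: A list of hiearchically encoded string values
--         that we want to group together.
--     :param int max_depth: The default depth (the max)
--     """
--
--     # NOTE: Geospatial points and chronological time-spans
--     # can be prepresented as hierarchic paths of strings. This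
--     # function is used to help determine the level depth of
--     # aggregation needed to group these stings into a max number
--     # of groups or less.
--
--     if max_depth is None:
--         # We're assuming that all the paths are strings of the
--         # same length.
--         max_depth = len(paths[0])
--
--     if len(paths) <= max_groups:
--         return max_depth
--
--     keep_looping = True
--     agg_depth = max_depth
--     while keep_looping and agg_depth > 0:
--         agg_depth -= 1
--         agg_paths = [p[:agg_depth] for p in paths]
--         agg_count = len(set(agg_paths))
--         if agg_count <= max_groups:
--             keep_looping = False
--             return agg_depth
--     return agg_depth
-- ===== SOURCE B (Python) =====
-- def get_aggregation_depth_to_group_paths(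
--     max_groups,
--     paths,
--     max_depth=None
-- ):
--     """Binary search over depth: the count of distinct length-d prefixes is
--     nondecreasing in d, so the largest depth giving <= max_groups groups can
--     be found by bisection instead of a linear downward scan."""
--     if max_depth is None:
--         max_depth = len(paths[0])
--     if len(paths) <= max_groups:
--         return max_depth
--     if max_depth <= 0:
--         return max_depth
--     def ok(d):
--         return len({p[:d] for p in paths}) <= max_groups
--     if not ok(0):
--         return 0
--     lo, hi = 0, max_depth - 1
--     while lo < hi:
--         mid = (lo + hi + 1) // 2
--         if ok(mid):
--             lo = mid
--         else:
--             hi = mid - 1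
--     return lo
-- ===== Notes on version B (the rewrite author's own statement) =====
-- stated objective: alternative
-- what changed: Replaces A's linear downward scan over depths with a binary search over depth, valid because the number of distinct length-d prefixes is nondecreasing in d; it probes O(log max_depth) depths instead of up to max_depth, but A often stops after its first probe, so measured speed is mixed.
import Mathlib
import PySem

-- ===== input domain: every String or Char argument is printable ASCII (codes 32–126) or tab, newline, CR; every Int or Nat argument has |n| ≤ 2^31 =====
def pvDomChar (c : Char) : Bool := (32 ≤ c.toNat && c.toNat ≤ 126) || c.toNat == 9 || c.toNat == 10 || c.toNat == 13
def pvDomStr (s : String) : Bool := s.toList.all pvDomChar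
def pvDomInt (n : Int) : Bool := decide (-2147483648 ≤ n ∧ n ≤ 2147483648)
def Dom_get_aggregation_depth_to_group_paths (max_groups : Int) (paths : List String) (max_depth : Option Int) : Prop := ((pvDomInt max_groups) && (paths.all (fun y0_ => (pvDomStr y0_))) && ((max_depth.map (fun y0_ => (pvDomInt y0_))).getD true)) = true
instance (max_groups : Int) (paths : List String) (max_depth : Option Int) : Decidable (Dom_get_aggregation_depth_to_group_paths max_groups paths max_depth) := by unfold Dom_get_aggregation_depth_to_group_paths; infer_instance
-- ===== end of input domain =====

-- B replaces A's linear downward scan over aggregation depths by a binary search over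
-- depth, exact because the distinct-prefix count is monotone in the depth (objective: alternative).


-- ===== PORT A =====
-- len(set([p[:d] for p in paths])) as an Int (this exact expression occurs in both sources)
def pvAggCount (paths : List String) (d : Int) : Int :=
  PySem.Set.len (PySem.Set.ofList (paths.map (fun p => PySem.Str.slice p none (some d))))

-- A's while-loop: decrement agg_depth, return it as soon as the count fits
def pvLoopA (max_groups : Int) (paths : List String) (agg_depth : Int) : Int :=
  if _h : agg_depth > 0 then
    let d := agg_depth - 1
    if pvAggCount paths d ≤ max_groups then d else pvLoopA max_groups paths d
  else agg_depth
termination_by agg_depth.toNat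
decreasing_by omega

def get_aggregation_depth_to_group_paths (max_groups : Int) (paths : List String) (max_depth : Option Int) : Int :=
  let md : Int := match max_depth with
    | none => PySem.Str.len ((PySem.List.pyGet? paths 0).getD "")   -- len(paths[0]); Pre_ excludes the IndexError
    | some d => d
  if (paths.length : Int) ≤ max_groups then md
  else pvLoopA max_groups paths md

-- ===== PORT B =====
def pvOk (max_groups : Int) (paths : List String) (d : Int) : Bool :=
  pvAggCount paths d ≤ max_groups

-- binary search for the largest d in [lo, hi] with pvOk (invariant: pvOk lo)
def pvBsearch (max_groups : Int) (paths : List String) (lo hi : Int) : Int :=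
  if _h : lo < hi then
    let mid := PySem.Int.floordiv (lo + hi + 1) 2
    if pvOk max_groups paths mid then pvBsearch max_groups paths mid hi
    else pvBsearch max_groups paths lo (mid - 1)
  else lo
termination_by (hi - lo).toNat
decreasing_by
  · have h1 : lo + 1 + hi = lo + hi + 1 := by ring
    have := PySem.Int.floordiv_two_mid_bounds (lo := lo + 1) (hi := hi) (by omega)
    rw [h1] at this; omega
  · have h1 : lo + 1 + hi = lo + hi + 1 := by ring
    have := PySem.Int.floordiv_two_mid_bounds (lo := lo + 1) (hi := hi) (by omega)
    rw [h1] at this; omega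

def get_aggregation_depth_to_group_paths_alt (max_groups : Int) (paths : List String) (max_depth : Option Int) : Int :=
  let md : Int := match max_depth with
    | none => PySem.Str.len ((PySem.List.pyGet? paths 0).getD "")
    | some d => d
  if (paths.length : Int) ≤ max_groups then md
  else if md ≤ 0 then md
  else if pvOk max_groups paths 0 = false then 0
  else pvBsearch max_groups paths 0 (md - 1)

-- ===== PRECONDITION & SPEC =====
-- A raises IndexError (paths[0]) when max_depth is None and paths is empty; excluded.
def Pre_get_aggregation_depth_to_group_paths (max_groups : Int) (paths : List String) (max_depth : Option Int) : Prop :=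
  max_depth = none → paths ≠ []
instance (max_groups : Int) (paths : List String) (max_depth : Option Int) : Decidable (Pre_get_aggregation_depth_to_group_paths max_groups paths max_depth) := by unfold Pre_get_aggregation_depth_to_group_paths; infer_instance
def pvWitness_get_aggregation_depth_to_group_paths : Int × List String × Option Int := (2, ["aa", "ab", "ba"], none)
def Spec_get_aggregation_depth_to_group_paths (max_groups : Int) (paths : List String) (max_depth : Option Int) (out : Int) : Prop := out = get_aggregation_depth_to_group_paths_alt max_groups paths max_depth
instance (max_groups : Int) (paths : List String) (max_depth : Option Int) (out : Int) : Decidable (Spec_get_aggregation_depth_to_group_paths max_groups paths max_depth out) := by unfold Spec_get_aggregation_depth_to_group_paths; infer_instance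

-- ===== CLAIM (what is proved, stated in full; the proofs are below) =====
def Claim_equal_get_aggregation_depth_to_group_paths : Prop := ∀ (max_groups : Int) (paths : List String) (max_depth : Option Int), Dom_get_aggregation_depth_to_group_paths max_groups paths max_depth → Pre_get_aggregation_depth_to_group_paths max_groups paths max_depth → Spec_get_aggregation_depth_to_group_paths max_groups paths max_depth (get_aggregation_depth_to_group_paths max_groups paths max_depth)

-- ===== LEMMAS AND PROOFS =====

-- a PySem set's size is the Finset cardinality of its elements
lemma pvSetLen_eq_card {α : Type} [DecidableEq α] [BEq α] [LawfulBEq α] (xs : List α) :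
    (PySem.Set.ofList xs).length = xs.toFinset.card := by
  rw [← List.toFinset_card_of_nodup (PySem.Set.nodup_ofList xs)]
  congr 1; ext x; simp [PySem.Set.mem_ofList]

lemma pvAggCount_eq (paths : List String) (d : Int) :
    pvAggCount paths d =
      ((paths.toFinset.image (fun p => PySem.Str.slice p none (some d))).card : Int) := by
  have hmap : (paths.map (fun p => PySem.Str.slice p none (some d))).toFinset
      = paths.toFinset.image (fun p => PySem.Str.slice p none (some d)) := by
    ext x; simp
  simp [pvAggCount, PySem.Set.len, pvSetLen_eq_card, hmap]

-- a shorter prefix of a prefix is the shorter prefix: p[:b][:a] = p[:a] for 0 ≤ a ≤ b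
lemma pvSlice_slice (p : String) (a b : Int) (h0 : 0 ≤ a) (hab : a ≤ b) :
    PySem.Str.slice (PySem.Str.slice p none (some b)) none (some a)
      = PySem.Str.slice p none (some a) := by
  have hb : (0:Int) ≤ b := le_trans h0 hab
  simp [PySem.Str.slice]
  rw [PySem.List.slice_to _ h0, PySem.List.slice_to _ hb, PySem.List.slice_to _ h0,
    List.take_take, Nat.min_eq_left (by omega)]

-- the number of distinct prefixes is nondecreasing in the prefix length
lemma pvAggCount_mono (paths : List String) (a b : Int) (h0 : 0 ≤ a) (hab : a ≤ b) :
    pvAggCount paths a ≤ pvAggCount paths b := by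
  rw [pvAggCount_eq, pvAggCount_eq]
  have : paths.toFinset.image (fun p => PySem.Str.slice p none (some a))
      = (paths.toFinset.image (fun p => PySem.Str.slice p none (some b))).image
          (fun s => PySem.Str.slice s none (some a)) := by
    rw [Finset.image_image]
    apply Finset.image_congr
    intro p _
    exact (pvSlice_slice p a b h0 hab).symm
  rw [this]
  exact_mod_cast Finset.card_image_le

lemma pvOk_down (mg : Int) (paths : List String) (a b : Int) (h0 : 0 ≤ a) (hab : a ≤ b)
    (hb : pvOk mg paths b = true) : pvOk mg paths a = true := by
  simp only [pvOk, decide_eq_true_eq] at *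
  exact le_trans (pvAggCount_mono paths a b h0 hab) hb

-- A's downward scan returns the largest fitting depth below D, or 0 if none fits
lemma pvLoopA_spec_aux (mg : Int) (paths : List String) : ∀ n : ℕ, ∀ D : Int, D = (n : Int) → 0 < D →
    (0 ≤ pvLoopA mg paths D ∧ pvLoopA mg paths D < D) ∧
      ((pvOk mg paths (pvLoopA mg paths D) = true ∧
        ∀ d, pvLoopA mg paths D < d → d < D → pvOk mg paths d = false) ∨
       (pvLoopA mg paths D = 0 ∧ ∀ d, 0 ≤ d → d < D → pvOk mg paths d = false)) := by
  intro n
  induction n with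
  | zero => intro D hD h; omega
  | succ n ih =>
    intro D hD h
    rw [pvLoopA]
    simp only [h, dif_pos]
    by_cases hok : pvAggCount paths (D - 1) ≤ mg
    · simp only [if_pos hok]
      refine ⟨⟨by omega, by omega⟩, Or.inl ⟨?_, ?_⟩⟩
      · simp [pvOk, hok]
      · intro d h1 h2; omega
    · simp only [if_neg hok]
      have hnok : pvOk mg paths (D - 1) = false := by simp [pvOk, hok]
      by_cases hn : 0 < D - 1
      · obtain ⟨hb, hc⟩ := ih (D - 1) (by omega) hn
        refine ⟨⟨hb.1, by omega⟩, ?_⟩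
        rcases hc with ⟨hok', hall⟩ | ⟨hz, hall⟩
        · exact Or.inl ⟨hok', fun d h1 h2 => by
            rcases lt_or_ge d (D - 1) with h3 | h3
            · exact hall d h1 h3
            · have : d = D - 1 := by omega
              rw [this]; exact hnok⟩
        · exact Or.inr ⟨hz, fun d h1 h2 => by
            rcases lt_or_ge d (D - 1) with h3 | h3
            · exact hall d h1 h3
            · have : d = D - 1 := by omega
              rw [this]; exact hnok⟩
      · have hD1 : D = 1 := by omega
        subst hD1
        rw [pvLoopA]
        norm_num
        refine Or.inr fun d h1 h2 => ?_
        have : d = 0 := by omega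
        rw [this]; simpa using hnok

-- B's binary search keeps pvOk at lo and no fitting depth above the window
lemma pvBsearch_spec_aux (mg : Int) (paths : List String) : ∀ n : ℕ, ∀ lo hi : Int,
    (hi - lo).toNat = n → 0 ≤ lo → lo ≤ hi → pvOk mg paths lo = true →
    pvOk mg paths (pvBsearch mg paths lo hi) = true ∧
      lo ≤ pvBsearch mg paths lo hi ∧ pvBsearch mg paths lo hi ≤ hi ∧
      ∀ d, pvBsearch mg paths lo hi < d → d ≤ hi → pvOk mg paths d = false := by
  intro n
  induction n using Nat.strong_induction_on with
  | _ n ih =>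
    intro lo hi hn h0 hlh hok
    rw [pvBsearch]
    by_cases hlt : lo < hi
    · simp only [dif_pos hlt]
      have hmb : lo + 1 ≤ PySem.Int.floordiv (lo + hi + 1) 2 ∧
          PySem.Int.floordiv (lo + hi + 1) 2 ≤ hi := by
        have h1 : lo + 1 + hi = lo + hi + 1 := by ring
        have := PySem.Int.floordiv_two_mid_bounds (lo := lo + 1) (hi := hi) (by omega)
        rw [h1] at this; exact this
      set mid := PySem.Int.floordiv (lo + hi + 1) 2 with hmid
      by_cases hm : pvOk mg paths mid = true
      · simp only [hm, if_pos]
        obtain ⟨a, b, c, e⟩ := ih (hi - mid).toNat (by omega) mid hi rfl (by omega) (by omega) hm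
        exact ⟨a, by omega, c, e⟩
      · simp only [hm, Bool.false_eq_true, if_false]
        obtain ⟨a, b, c, e⟩ := ih (mid - 1 - lo).toNat (by omega) lo (mid - 1) rfl h0 (by omega) hok
        refine ⟨a, b, by omega, fun d h1 h2 => ?_⟩
        rcases le_or_gt d (mid - 1) with h3 | h3
        · exact e d h1 h3
        · rcases Bool.eq_false_or_eq_true (pvOk mg paths d) with h4 | h4
          · exact absurd (pvOk_down mg paths mid d (by omega) (by omega) h4) (by simpa using hm)
          · exact h4
    · simp only [dif_neg hlt]
      exact ⟨hok, le_refl _, by omega, fun d h1 h2 => by omega⟩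

-- A's result equals B's result, for any common starting depth M
lemma pvMain (mg : Int) (paths : List String) (M : Int) :
    (if (paths.length : Int) ≤ mg then M else pvLoopA mg paths M)
      = (if (paths.length : Int) ≤ mg then M
          else if M ≤ 0 then M
          else if pvOk mg paths 0 = false then 0
          else pvBsearch mg paths 0 (M - 1)) := by
  by_cases h1 : (paths.length : Int) ≤ mg
  · simp [h1]
  · simp only [if_neg h1]
    by_cases h2 : M ≤ 0
    · rw [if_pos h2, pvLoopA, dif_neg (by omega)]
    · rw [if_neg h2]
      have hA := pvLoopA_spec_aux mg paths M.toNat M (by omega) (by omega)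
      by_cases h3 : pvOk mg paths 0 = false
      · rw [if_pos h3]
        rcases hA.2 with ⟨hok, _⟩ | ⟨hz, _⟩
        · exact absurd (pvOk_down mg paths 0 _ le_rfl hA.1.1 hok) (by simp [h3])
        · exact hz
      · rw [if_neg h3]
        have hok0 : pvOk mg paths 0 = true := by
          revert h3; cases pvOk mg paths 0 <;> simp
        obtain ⟨bok, blo, bhi, ball⟩ :=
          pvBsearch_spec_aux mg paths (M - 1 - 0).toNat 0 (M - 1) rfl le_rfl (by omega) hok0
        rcases hA.2 with ⟨aok, aall⟩ | ⟨hz, hall⟩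
        · rcases lt_trichotomy (pvLoopA mg paths M) (pvBsearch mg paths 0 (M - 1)) with h | h | h
          · exact absurd (aall _ h (by omega)) (by simp [bok])
          · exact h
          · exact absurd (ball _ h (by omega)) (by simp [aok])
        · exact absurd (hall 0 le_rfl (by omega)) (by simp [hok0])

-- ===== VERDICT (by name: the statement is the Claim_ definition above) =====
theorem get_aggregation_depth_to_group_paths_spec : Claim_equal_get_aggregation_depth_to_group_paths := by
  intro mg paths md _hdom _hpre
  unfold Spec_get_aggregation_depth_to_group_paths
  cases md <;>
    simp only [get_aggregation_depth_to_group_paths, get_aggregation_depth_to_group_paths_alt] <;>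
    exact pvMain mg paths _
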